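-- pv_equiv track=rewrite | github.com/Lildhansen/chess.py | chess.py/chess.py.py | gamePosToCodePos
-- ===== SOURCE A (Python) =====
-- def gamePosToCodePos(gamePos):
--     codePos = list(gamePos)
--     countX = 1
--     countY = 1
--     while codePos[0] > 120 or codePos[1] > 120:
--         if codePos[0] > 120:
--             codePos[0] -= 120
--             countX += 1
--         if codePos[1] > 120:
--             codePos[1] -= 120
--             countY += 1
--     return countX,countY
-- ===== SOURCE B (Python) =====
-- def gamePosToCodePos(gamePos):
--     def blocks(c):
--         # number of 120-steps A's loop performs on this axis, plus the initial 1: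
--         # 1 + ceil((c - 120)/120) when c > 120, else 1
--         return 1 - min(0, (120 - c) // 120)
--     return blocks(gamePos[0]), blocks(gamePos[1])
-- ===== Notes on version B (the rewrite author's own statement) =====
-- stated objective: alternative
-- what changed: replaced the repeated-subtraction while-loop by a closed-form floor-division formula per axis (constant work per axis in the coordinate magnitude instead of one loop iteration per 120-block)
import Mathlib
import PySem

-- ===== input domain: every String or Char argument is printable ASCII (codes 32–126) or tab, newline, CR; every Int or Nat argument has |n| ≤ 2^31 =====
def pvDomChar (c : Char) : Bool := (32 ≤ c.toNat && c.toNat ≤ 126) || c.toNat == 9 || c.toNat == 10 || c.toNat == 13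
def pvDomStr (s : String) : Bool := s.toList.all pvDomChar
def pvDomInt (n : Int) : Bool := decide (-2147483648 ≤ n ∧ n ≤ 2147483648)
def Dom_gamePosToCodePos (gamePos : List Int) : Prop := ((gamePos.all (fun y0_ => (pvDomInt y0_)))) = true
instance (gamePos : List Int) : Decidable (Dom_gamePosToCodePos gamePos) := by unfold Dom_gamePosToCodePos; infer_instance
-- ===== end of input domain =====

-- B replaces A's repeated-subtraction while-loop by a closed-form floor-division formula per axis.

-- ===== PORT A =====
-- A's while loop: repeatedly subtract 120 from each coordinate while it exceeds 120,
-- counting the subtractions (starting from 1 on each axis).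
-- fuel-based structural recursion; the fuel is an upper bound on the iteration count,
-- one more than the termination measure, so it never runs out (a totality device only).
def pvLoopA (fuel : Nat) (x y cx cy : Int) : Int × Int :=
  match fuel with
  | 0 => (cx, cy)
  | n + 1 =>
    if x > 120 ∨ y > 120 then
      pvLoopA n (if x > 120 then x - 120 else x) (if y > 120 then y - 120 else y)
              (if x > 120 then cx + 1 else cx) (if y > 120 then cy + 1 else cy)
    else (cx, cy)

def gamePosToCodePos (gamePos : List Int) : List Int :=
  match PySem.List.pyGet? gamePos 0, PySem.List.pyGet? gamePos 1 with
  | some x, some y => let r := pvLoopA ((max (x - 120) 0 + max (y - 120) 0).toNat + 1) x y 1 1; [r.1, r.2]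
  | _, _ => []   -- IndexError in Python; excluded by Pre_

-- ===== PORT B =====
def pvBlocks (c : Int) : Int := 1 - min 0 (PySem.Int.floordiv (120 - c) 120)

def gamePosToCodePos_alt (gamePos : List Int) : List Int :=
  match PySem.List.pyGet? gamePos 0 with
  | none => []   -- IndexError in Python; excluded by Pre_
  | some x =>
    match PySem.List.pyGet? gamePos 1 with
    | none => []   -- IndexError in Python; excluded by Pre_
    | some y => [pvBlocks x, pvBlocks y]

-- ===== PRECONDITION & SPEC =====
-- A (and B) raise IndexError on lists with fewer than two elements.
def Pre_gamePosToCodePos (gamePos : List Int) : Prop := 2 ≤ gamePos.length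
instance (gamePos : List Int) : Decidable (Pre_gamePosToCodePos gamePos) := by
  unfold Pre_gamePosToCodePos; infer_instance
def pvWitness_gamePosToCodePos : List Int := [240, 7]

def Spec_gamePosToCodePos (gamePos : List Int) (out : List Int) : Prop := out = gamePosToCodePos_alt gamePos
instance (gamePos : List Int) (out : List Int) : Decidable (Spec_gamePosToCodePos gamePos out) := by unfold Spec_gamePosToCodePos; infer_instance

-- ===== CLAIM (what is proved, stated in full; the proofs are below) =====
def Claim_equal_gamePosToCodePos : Prop := ∀ (gamePos : List Int), Dom_gamePosToCodePos gamePos → Pre_gamePosToCodePos gamePos → Spec_gamePosToCodePos gamePos (gamePosToCodePos gamePos)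

-- ===== LEMMAS AND PROOFS =====

theorem pvBlocks_le (c : Int) (h : c ≤ 120) : pvBlocks c = 1 := by
  unfold pvBlocks
  have h1 : 0 ≤ PySem.Int.floordiv (120 - c) 120 := by
    have := PySem.Int.floordiv_eq_iff_of_pos (a := 120 - c) (b := 120)
      (q := PySem.Int.floordiv (120 - c) 120) (by omega)
    omega
  omega

theorem pvBlocks_gt (c : Int) (h : c > 120) : pvBlocks c = 1 + pvBlocks (c - 120) := by
  unfold pvBlocks
  have h1 := PySem.Int.floordiv_eq_iff_of_pos (a := 120 - c) (b := 120)
    (q := PySem.Int.floordiv (120 - c) 120) (by omega)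
  have h2 := PySem.Int.floordiv_eq_iff_of_pos (a := 120 - (c - 120)) (b := 120)
    (q := PySem.Int.floordiv (120 - (c - 120)) 120) (by omega)
  omega

theorem pvLoopA_eq (fuel : Nat) (x y cx cy : Int)
    (hf : (max (x - 120) 0 + max (y - 120) 0).toNat < fuel) :
    pvLoopA fuel x y cx cy = (cx + pvBlocks x - 1, cy + pvBlocks y - 1) := by
  induction fuel generalizing x y cx cy with
  | zero => omega
  | succ n ih =>
    rw [pvLoopA]
    split_ifs with h hx hy hy'
    · rw [ih _ _ _ _ (by omega), Prod.mk.injEq, pvBlocks_gt x hx, pvBlocks_gt y hy]; omega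
    · rw [ih _ _ _ _ (by omega), Prod.mk.injEq, pvBlocks_gt x hx]; omega
    · rw [ih _ _ _ _ (by omega), Prod.mk.injEq, pvBlocks_gt y hy']; omega
    · exact absurd h (by omega)
    · rw [pvBlocks_le x (by omega), pvBlocks_le y (by omega), Prod.mk.injEq]; omega

-- ===== VERDICT (by name: the statement is the Claim_ definition above) =====
theorem gamePosToCodePos_spec : Claim_equal_gamePosToCodePos := by
  intro gamePos _ hpre
  unfold Spec_gamePosToCodePos
  match gamePos, hpre with
  | x :: y :: rest, _ =>
    have hc : (0:Int) ≤ (rest.length:Int) + 1 := by omega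
    have h0 : PySem.List.pyGet? (x :: y :: rest) 0 = some x := by
      simp [PySem.List.pyGet?, PySem.List.pyIdx?, hc]
    have h1 : PySem.List.pyGet? (x :: y :: rest) 1 = some y := by
      simp [PySem.List.pyGet?, PySem.List.pyIdx?]
    simp only [gamePosToCodePos, gamePosToCodePos_alt, h0, h1]
    rw [pvLoopA_eq _ x y 1 1 (by omega)]
    norm_num
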